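-- pv_equiv track=rewrite | github.com/qmeeus/MSNER | spoken_ner/evaluate.py | get_ner_stats
-- ===== SOURCE A (Python) =====
-- from collections import defaultdict
-- from typing import Any, Dict, List, Union, Tuple
--
-- NamedEntity = Tuple[str, str, int]
--
-- Json = Dict[str, Any]
--
-- def get_ner_stats(all_gt:List[NamedEntity], all_predictions:List[NamedEntity]) -> Json:
--     stats = {}
--     cnt = 0
--     for gt, pred in zip(all_gt, all_predictions):
--         entities_true = defaultdict(set)
--         entities_pred = defaultdict(set)
--         for type_name, entity_info1, entity_info2 in gt:
--             entities_true[type_name].add((entity_info1, entity_info2))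
--         for type_name, entity_info1, entity_info2 in pred:
--             entities_pred[type_name].add((entity_info1, entity_info2))
--         target_names = sorted(set(entities_true.keys()) | set(entities_pred.keys()))
--         for tag_name in target_names:
--             _ = stats.setdefault(tag_name, {})
--             _ = stats[tag_name].setdefault("tp", [])
--             _ = stats[tag_name].setdefault("gt_cnt", [])
--             _ = stats[tag_name].setdefault("pred_cnt", [])
--             entities_true_type = entities_true.get(tag_name, set())
--             entities_pred_type = entities_pred.get(tag_name, set())
--             stats[tag_name]["tp"].append(len(entities_true_type & entities_pred_type))
--             stats[tag_name]["pred_cnt"].append(len(entities_pred_type))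
--             stats[tag_name]["gt_cnt"].append(len(entities_true_type))
--     return stats
-- ===== SOURCE B (Python) =====
-- def get_ner_stats(all_gt, all_predictions):
--     # Phase 1: flatten into one row stream (tag, tp, pred_cnt, gt_cnt), one row per
--     # (sentence, tag) in sorted-tag order per sentence.
--     rows = []
--     for gt, pred in zip(all_gt, all_predictions):
--         gt_set = set(gt)
--         pred_set = set(pred)
--         both = gt_set & pred_set
--         tags = sorted({e[0] for e in gt_set} | {e[0] for e in pred_set})
--         for tag in tags:
--             rows.append((tag,
--                          sum(1 for e in both if e[0] == tag),
--                          sum(1 for e in pred_set if e[0] == tag),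
--                          sum(1 for e in gt_set if e[0] == tag)))
--     # Phase 2: group rows by tag, keeping first-appearance order of tags.
--     order = []
--     seen = set()
--     for r in rows:
--         if r[0] not in seen:
--             seen.add(r[0])
--             order.append(r[0])
--     return {tag: {"tp": [r[1] for r in rows if r[0] == tag],
--                   "gt_cnt": [r[3] for r in rows if r[0] == tag],
--                   "pred_cnt": [r[2] for r in rows if r[0] == tag]}
--             for tag in order}
-- ===== Notes on version B (the rewrite author's own statement) =====
-- stated objective: alternative
-- what changed: B flattens everything into one stream of per-(sentence,tag) rows (tag, tp, pred, gt) computed by whole-tuple set intersection and counting, then groups the rows by tag in first-appearance order at the end, instead of A's per-type set dictionaries and an incrementally mutated nested stats dict.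
import Mathlib
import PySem

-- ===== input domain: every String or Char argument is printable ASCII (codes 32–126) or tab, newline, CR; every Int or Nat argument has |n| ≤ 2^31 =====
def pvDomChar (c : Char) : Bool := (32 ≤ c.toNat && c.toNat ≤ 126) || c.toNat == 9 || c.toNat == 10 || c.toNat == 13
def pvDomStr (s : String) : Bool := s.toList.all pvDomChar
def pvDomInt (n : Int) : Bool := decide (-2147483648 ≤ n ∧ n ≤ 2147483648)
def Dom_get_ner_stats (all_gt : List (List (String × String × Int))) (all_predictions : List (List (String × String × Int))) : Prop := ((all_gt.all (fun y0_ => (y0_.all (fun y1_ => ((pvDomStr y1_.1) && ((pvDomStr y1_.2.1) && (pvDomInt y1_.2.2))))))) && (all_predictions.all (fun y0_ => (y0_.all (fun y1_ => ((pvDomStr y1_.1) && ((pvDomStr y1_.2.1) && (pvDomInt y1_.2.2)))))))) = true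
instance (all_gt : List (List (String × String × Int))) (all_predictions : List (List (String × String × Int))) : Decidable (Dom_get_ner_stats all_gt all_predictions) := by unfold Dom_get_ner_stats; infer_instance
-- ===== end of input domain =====

-- B flattens the input into one stream of per-(sentence,tag) rows and groups it by tag at the
-- end, instead of A's per-type set dictionaries and incrementally mutated nested stats dict
-- (objective: alternative, same cost).

-- ===== PORT A =====
-- the 'for type_name, i1, i2 in …: entities[type_name].add((i1, i2))' defaultdict(set) loop
def pvEntityDict (l : List (String × String × Int)) : PySem.Dict String (PySem.Set (String × Int)) :=
  l.foldl (fun d e => d.modify e.1 PySem.Set.empty (fun s => PySem.Set.add s e.2)) PySem.Dict.empty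

-- body of A's 'for tag_name in target_names' loop; x, y, z are the three appended lengths
-- len(true&pred), len(pred), len(true) (pure values, passed in precomputed)
def pvAbody (stats : PySem.Dict String (PySem.Dict String (List Int))) (tag : String)
    (x y z : Int) : PySem.Dict String (PySem.Dict String (List Int)) :=
  let stats := stats.setdefault tag PySem.Dict.empty
  let stats := stats.modify tag PySem.Dict.empty (fun d => d.setdefault "tp" [])
  let stats := stats.modify tag PySem.Dict.empty (fun d => d.setdefault "gt_cnt" [])
  let stats := stats.modify tag PySem.Dict.empty (fun d => d.setdefault "pred_cnt" [])
  let stats := stats.modify tag PySem.Dict.empty (fun d => d.modify "tp" [] (fun l => l ++ [x]))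
  let stats := stats.modify tag PySem.Dict.empty (fun d => d.modify "pred_cnt" [] (fun l => l ++ [y]))
  stats.modify tag PySem.Dict.empty (fun d => d.modify "gt_cnt" [] (fun l => l ++ [z]))

-- body of A's 'for gt, pred in zip(…)' loop
def pvStepA (stats : PySem.Dict String (PySem.Dict String (List Int)))
    (gp : List (String × String × Int) × List (String × String × Int)) :
    PySem.Dict String (PySem.Dict String (List Int)) :=
  let entities_true := pvEntityDict gp.1
  let entities_pred := pvEntityDict gp.2
  let target_names := PySem.List.sorted
    (PySem.Set.union (PySem.Set.ofList entities_true.keys) (PySem.Set.ofList entities_pred.keys))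
    (fun x => x) false
  target_names.foldl (fun stats tag =>
    let entities_true_type := entities_true.getD tag PySem.Set.empty
    let entities_pred_type := entities_pred.getD tag PySem.Set.empty
    pvAbody stats tag
      (PySem.Set.len (PySem.Set.inter entities_true_type entities_pred_type))
      (PySem.Set.len entities_pred_type)
      (PySem.Set.len entities_true_type)) stats

def get_ner_stats (all_gt : List (List (String × String × Int))) (all_predictions : List (List (String × String × Int))) : List (String × List (String × List Int)) :=
  let stats := (all_gt.zip all_predictions).foldl pvStepA PySem.Dict.empty
  stats.items.map (fun q => (q.1, q.2.items))

-- ===== PORT B =====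
-- one sentence of B's phase 1: the list of rows (tag, tp, pred_cnt, gt_cnt) it appends;
-- 'sum(1 for e in s if e[0] == tag)' is List.countP (a 0/1-generator sum), exact
def pvSentenceRows (gp : List (String × String × Int) × List (String × String × Int)) :
    List (String × Int × Int × Int) :=
  let gt_set := PySem.Set.ofList gp.1
  let pred_set := PySem.Set.ofList gp.2
  let both := PySem.Set.inter gt_set pred_set
  let tags := PySem.List.sorted
    (PySem.Set.union (PySem.Set.ofList (gt_set.map (fun e => e.1)))
                     (PySem.Set.ofList (pred_set.map (fun e => e.1))))
    (fun x => x) false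
  tags.map (fun tag =>
    (tag, ((both.countP (fun e => e.1 == tag) : Nat) : Int),
          ((pred_set.countP (fun e => e.1 == tag) : Nat) : Int),
          ((gt_set.countP (fun e => e.1 == tag) : Nat) : Int)))

-- B's phase 2 first-appearance order loop ('order', 'seen')
def pvOrderLoop (rows : List (String × Int × Int × Int)) :
    List String × PySem.Set String :=
  rows.foldl (fun st r =>
    if PySem.Set.contains st.2 r.1 then st else (st.1 ++ [r.1], PySem.Set.add st.2 r.1))
    ([], PySem.Set.empty)

-- B's final dict comprehension: keys are taken from 'order', which holds distinct tags in
-- insertion order, so the dict is exactly this association list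
def get_ner_stats_alt (all_gt : List (List (String × String × Int))) (all_predictions : List (List (String × String × Int))) : List (String × List (String × List Int)) :=
  let rows := (all_gt.zip all_predictions).foldl (fun acc gp => acc ++ pvSentenceRows gp) []
  let order := (pvOrderLoop rows).1
  order.map (fun tag =>
    (tag, [("tp", (rows.filter (fun r => r.1 == tag)).map (fun r => r.2.1)),
           ("gt_cnt", (rows.filter (fun r => r.1 == tag)).map (fun r => r.2.2.2)),
           ("pred_cnt", (rows.filter (fun r => r.1 == tag)).map (fun r => r.2.2.1))]))

-- ===== PRECONDITION & SPEC =====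
def Spec_get_ner_stats (all_gt : List (List (String × String × Int))) (all_predictions : List (List (String × String × Int))) (out : List (String × List (String × List Int))) : Prop := out = get_ner_stats_alt all_gt all_predictions
instance (all_gt : List (List (String × String × Int))) (all_predictions : List (List (String × String × Int))) (out : List (String × List (String × List Int))) : Decidable (Spec_get_ner_stats all_gt all_predictions out) := by unfold Spec_get_ner_stats; infer_instance

-- ===== CLAIM (what is proved, stated in full; the proofs are below) =====
def Claim_equal_get_ner_stats : Prop := ∀ (all_gt : List (List (String × String × Int))) (all_predictions : List (List (String × String × Int))), Dom_get_ner_stats all_gt all_predictions → Spec_get_ner_stats all_gt all_predictions (get_ner_stats all_gt all_predictions)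

-- ===== LEMMAS AND PROOFS =====

-- uncurried pvAbody: one flattened row (tag, tp, pred_cnt, gt_cnt)
def pvAbody' (stats : PySem.Dict String (PySem.Dict String (List Int)))
    (r : String × Int × Int × Int) : PySem.Dict String (PySem.Dict String (List Int)) :=
  pvAbody stats r.1 r.2.1 r.2.2.1 r.2.2.2

-- tags of the row stream in first-appearance order
def pvOrd (rows : List (String × Int × Int × Int)) : List String :=
  PySem.Set.ofList (rows.map (fun r => r.1))

-- the grouped dict B's phase 2 describes
def pvGroupVal (rows : List (String × Int × Int × Int)) (tag : String) :
    PySem.Dict String (List Int) :=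
  PySem.Dict.mk [("tp", (rows.filter (fun r => r.1 == tag)).map (fun r => r.2.1)),
                 ("gt_cnt", (rows.filter (fun r => r.1 == tag)).map (fun r => r.2.2.2)),
                 ("pred_cnt", (rows.filter (fun r => r.1 == tag)).map (fun r => r.2.2.1))]

def pvGroup (rows : List (String × Int × Int × Int)) :
    PySem.Dict String (PySem.Dict String (List Int)) :=
  PySem.Dict.mk ((pvOrd rows).map (fun tag => (tag, pvGroupVal rows tag)))

lemma pv_get?_mk_map {ν : Type} (ord : List String) (g : String → ν) (tag : String)
    (hnd : ord.Nodup) :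
    (PySem.Dict.mk (ord.map (fun t => (t, g t)))).get? tag
      = if tag ∈ ord then some (g tag) else none := by
  induction ord with
  | nil => rfl
  | cons t rest ih =>
    rw [List.map_cons, PySem.Dict.get?_mk_cons, ih hnd.of_cons]
    by_cases h : t = tag
    · simp [h]
    · have : tag ∈ t :: rest ↔ tag ∈ rest := by simp [List.mem_cons, Ne.symm h]
      simp [h, this]

lemma pvAbody_of_get? (stats : PySem.Dict String (PySem.Dict String (List Int))) (tag : String)
    (x y z : Int) (a b c : List Int)
    (hv : stats.get? tag = some (PySem.Dict.mk [("tp", a), ("gt_cnt", b), ("pred_cnt", c)])) :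
    pvAbody stats tag x y z
      = stats.insert tag (PySem.Dict.mk [("tp", a ++ [x]), ("gt_cnt", b ++ [z]), ("pred_cnt", c ++ [y])]) := by
  have h : stats.contains tag = true := by
    rw [PySem.Dict.contains_eq_isSome_get?, hv]; rfl
  simp only [pvAbody, PySem.Dict.setdefault_of_contains _ _ h, PySem.Dict.modify,
    PySem.Dict.getD_insert_self, PySem.Dict.insert_insert_self,
    PySem.Dict.getD_of_get?_eq_some _ _ hv]
  rfl

lemma pvAbody_of_not_contains (stats : PySem.Dict String (PySem.Dict String (List Int)))
    (tag : String) (x y z : Int) (h : stats.contains tag = false) :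
    pvAbody stats tag x y z
      = stats.insert tag (PySem.Dict.mk [("tp", [x]), ("gt_cnt", [z]), ("pred_cnt", [y])]) := by
  simp only [pvAbody, PySem.Dict.setdefault_of_not_contains _ _ h, PySem.Dict.modify,
    PySem.Dict.getD_insert_self, PySem.Dict.insert_insert_self]
  rfl

lemma pv_keys_group (rows : List (String × Int × Int × Int)) :
    (pvGroup rows).keys = pvOrd rows := by
  rw [pvGroup, PySem.Dict.keys_mk, List.map_map]
  rw [show ((fun (x : String × PySem.Dict String (List Int)) => x.1)
      ∘ (fun tag => (tag, pvGroupVal rows tag))) = fun t => t from rfl]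
  exact List.map_id _

-- the group-by characterisation of A's stats fold over the flattened row stream
lemma pv_fold_group (rows : List (String × Int × Int × Int)) :
    rows.foldl pvAbody' PySem.Dict.empty = pvGroup rows := by
  induction rows using List.reverseRecOn with
  | nil => rfl
  | append_singleton rows r ih =>
    rw [List.foldl_append, List.foldl_cons, List.foldl_nil, ih]
    have hnd : (pvOrd rows).Nodup := PySem.Set.nodup_ofList _
    by_cases hm : r.1 ∈ pvOrd rows
    · -- tag already present: in-place update of its three lists
      have hget : (pvGroup rows).get? r.1 = some (pvGroupVal rows r.1) := by
        rw [pvGroup, pv_get?_mk_map _ _ _ hnd, if_pos hm]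
      have hord : pvOrd (rows ++ [r]) = pvOrd rows := by
        rw [pvOrd, pvOrd, List.map_append, List.map_cons, List.map_nil,
          PySem.Set.ofList_append_singleton]
        exact PySem.Set.add_of_mem hm
      have hcont : (pvGroup rows).contains r.1 = true := by
        rw [PySem.Dict.contains_eq_decide_mem_keys, pv_keys_group]; simpa using hm
      rw [pvAbody', pvAbody_of_get? _ _ _ _ _ _ _ _ hget]
      apply PySem.Dict.ext
      rw [PySem.Dict.items_insert_of_contains _ _ hcont]
      show List.map _ ((pvOrd rows).map _) = ((pvOrd (rows ++ [r])).map _)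
      rw [hord, List.map_map]
      apply List.map_congr_left
      intro t ht
      simp only [Function.comp_apply]
      by_cases h : t = r.1
      · rw [if_pos (by simp [h]), h]
        have hfil : (rows ++ [r]).filter (fun q => q.1 == r.1) = rows.filter (fun q => q.1 == r.1) ++ [r] := by
          rw [List.filter_append]; simp
        simp only [pvGroupVal, hfil, List.map_append]
        rfl
      · rw [if_neg (by simpa using h)]
        have hfil : (rows ++ [r]).filter (fun q => q.1 == t) = rows.filter (fun q => q.1 == t) := by
          rw [List.filter_append]; simp [Ne.symm h]
        simp only [pvGroupVal, hfil]
    · -- new tag: appended at the end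
      have hord : pvOrd (rows ++ [r]) = pvOrd rows ++ [r.1] := by
        rw [pvOrd, pvOrd, List.map_append, List.map_cons, List.map_nil,
          PySem.Set.ofList_append_singleton]
        exact PySem.Set.add_of_not_mem hm
      have hcont : (pvGroup rows).contains r.1 = false := by
        rw [PySem.Dict.contains_eq_decide_mem_keys, pv_keys_group]; simpa using hm
      have hnew : r.1 ∉ rows.map (fun q => q.1) := fun hc =>
        hm ((PySem.Set.mem_ofList _ _).mpr hc)
      rw [pvAbody', pvAbody_of_not_contains _ _ _ _ _ hcont]
      apply PySem.Dict.ext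
      rw [PySem.Dict.items_insert_of_not_contains _ _ hcont]
      show ((pvOrd rows).map _) ++ _ = ((pvOrd (rows ++ [r])).map _)
      rw [hord, List.map_append]
      congr 1
      · apply List.map_congr_left
        intro t ht
        have h : t ≠ r.1 := fun hc => hm (hc ▸ ht)
        have hfil : (rows ++ [r]).filter (fun q => q.1 == t) = rows.filter (fun q => q.1 == t) := by
          rw [List.filter_append]; simp [Ne.symm h]
        simp only [pvGroupVal, hfil]
      · have hfil : rows.filter (fun q => q.1 == r.1) = [] := by
          rw [List.filter_eq_nil_iff]
          intro q hq hc
          exact hnew (List.mem_map.mpr ⟨q, hq, by simpa using hc⟩)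
        have hfil2 : (rows ++ [r]).filter (fun q => q.1 == r.1) = [r] := by
          rw [List.filter_append, hfil]; simp
        simp only [List.map_cons, List.map_nil, pvGroupVal, hfil2]

-- B's order/seen loop computes exactly pvOrd
lemma pv_orderLoop_gen (rows : List (String × Int × Int × Int)) (s : PySem.Set String) :
    rows.foldl (fun st r =>
        if PySem.Set.contains st.2 r.1 then st else (st.1 ++ [r.1], PySem.Set.add st.2 r.1))
      (s, s)
      = (PySem.Set.update s (rows.map (fun r => r.1)),
         PySem.Set.update s (rows.map (fun r => r.1))) := by
  induction rows generalizing s with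
  | nil => rfl
  | cons r rest ih =>
    rw [List.foldl_cons, List.map_cons, PySem.Set.update_cons]
    dsimp only
    by_cases hm : r.1 ∈ s
    · rw [if_pos ((PySem.Set.contains_iff _ _).mpr hm), PySem.Set.add_of_mem hm]
      exact ih s
    · rw [if_neg (fun hc => hm ((PySem.Set.contains_iff _ _).mp hc)),
        PySem.Set.add_of_not_mem hm]
      exact ih (s ++ [r.1])

lemma pv_orderLoop (rows : List (String × Int × Int × Int)) :
    (pvOrderLoop rows).1 = pvOrd rows := by
  have h := congrArg Prod.fst (pv_orderLoop_gen rows PySem.Set.empty)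
  rw [pvOrd, ← PySem.Set.update_nil_left]
  exact h

-- ===== per-sentence value and tag-list equalities (A's per-type sets vs B's countP) =====

lemma pv_entityDict_getD_gen (l : List (String × String × Int))
    (d : PySem.Dict String (PySem.Set (String × Int))) (tag : String) :
    (l.foldl (fun d e => d.modify e.1 PySem.Set.empty (fun s => PySem.Set.add s e.2)) d).getD tag PySem.Set.empty
      = PySem.Set.update (d.getD tag PySem.Set.empty) ((l.filter (fun e => e.1 == tag)).map (fun e => e.2)) := by
  induction l generalizing d with
  | nil => simp [PySem.Set.update_nil]
  | cons e rest ih =>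
    rw [List.foldl_cons, ih]
    by_cases h : e.1 = tag
    · rw [List.filter_cons_of_pos (by simp [h]), List.map_cons, PySem.Set.update_cons]
      congr 1
      rw [h, PySem.Dict.getD_modify_self]
    · rw [List.filter_cons_of_neg (by simp [h])]
      congr 1
      rw [PySem.Dict.getD_modify_of_ne]
      exact fun hc => h hc.symm

lemma pv_entityDict_getD (l : List (String × String × Int)) (tag : String) :
    (pvEntityDict l).getD tag PySem.Set.empty
      = PySem.Set.ofList ((l.filter (fun e => e.1 == tag)).map (fun e => e.2)) := by
  rw [pvEntityDict, pv_entityDict_getD_gen]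
  rw [show (PySem.Dict.empty : PySem.Dict String (PySem.Set (String × Int))).getD tag PySem.Set.empty = PySem.Set.empty from rfl]
  exact PySem.Set.update_nil_left _

lemma pv_entityDict_keys (l : List (String × String × Int)) :
    (pvEntityDict l).keys = PySem.Set.ofList (l.map (fun e => e.1)) := by
  rw [pvEntityDict]
  rw [PySem.Dict.keys_foldl_modify_key l (fun e => e.1) PySem.Set.empty
    (fun _ e s => PySem.Set.add s e.2) PySem.Dict.empty]
  rw [PySem.Dict.keys_empty]
  exact PySem.Set.update_nil_left _

lemma pv_ofList_filter {α : Type} [BEq α] [LawfulBEq α] (p : α → Bool) (l : List α) :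
    PySem.Set.ofList (l.filter p) = (PySem.Set.ofList l).filter p := by
  induction l using List.reverseRecOn with
  | nil => rfl
  | append_singleton l x ih =>
    rw [List.filter_append, PySem.Set.ofList_append_singleton]
    by_cases hm : x ∈ PySem.Set.ofList l
    · rw [PySem.Set.add_of_mem hm]
      cases hp : p x
      · rw [show List.filter p [x] = [] by simp [hp], List.append_nil]; exact ih
      · rw [show List.filter p [x] = [x] by simp [hp]]
        rw [PySem.Set.ofList_append_singleton, ih]
        rw [PySem.Set.add_of_mem (by simp [List.mem_filter, hm, hp])]
    · rw [PySem.Set.add_of_not_mem hm, List.filter_append]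
      cases hp : p x
      · rw [show List.filter p [x] = [] by simp [hp], List.append_nil]
        simpa using ih
      · rw [show List.filter p [x] = [x] by simp [hp]]
        rw [PySem.Set.ofList_append_singleton, ih]
        rw [PySem.Set.add_of_not_mem (by simp [List.mem_filter, hm])]

lemma pv_ofList_map {α β : Type} [BEq α] [LawfulBEq α] [BEq β] [LawfulBEq β]
    (f : α → β) (l : List α) (hinj : ∀ a ∈ l, ∀ b ∈ l, f a = f b → a = b) :
    PySem.Set.ofList (l.map f) = (PySem.Set.ofList l).map f := by
  induction l using List.reverseRecOn with
  | nil => rfl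
  | append_singleton l x ih =>
    have hinj' : ∀ a ∈ l, ∀ b ∈ l, f a = f b → a = b := fun a ha b hb =>
      hinj a (by simp [ha]) b (by simp [hb])
    rw [List.map_append, show List.map f [x] = [f x] from rfl, PySem.Set.ofList_append_singleton,
      PySem.Set.ofList_append_singleton, ih hinj']
    by_cases hm : x ∈ PySem.Set.ofList l
    · rw [PySem.Set.add_of_mem hm, PySem.Set.add_of_mem (by
        exact List.mem_map_of_mem hm)]
    · rw [PySem.Set.add_of_not_mem hm, PySem.Set.add_of_not_mem ?_, List.map_append]
      · simp
      · intro hc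
        obtain ⟨a, ha, hfa⟩ := List.mem_map.mp hc
        have : a ∈ l := by
          have := (PySem.Set.mem_ofList _ _).mp ha; exact this
        exact hm (by rw [hinj a (by simp [this]) x (by simp) hfa] at ha; exact ha)

lemma pv_ofList_map_ofList {α β : Type} [BEq α] [LawfulBEq α] [BEq β] [LawfulBEq β]
    (f : α → β) (l : List α) :
    PySem.Set.ofList ((PySem.Set.ofList l).map f) = PySem.Set.ofList (l.map f) := by
  induction l using List.reverseRecOn with
  | nil => rfl
  | append_singleton l x ih =>
    rw [List.map_append, show List.map f [x] = [f x] from rfl, PySem.Set.ofList_append_singleton,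
      PySem.Set.ofList_append_singleton, ← ih]
    by_cases hm : x ∈ PySem.Set.ofList l
    · rw [PySem.Set.add_of_mem hm, PySem.Set.add_of_mem ?_]
      exact (PySem.Set.mem_ofList _ _).mpr (List.mem_map_of_mem hm)
    · rw [PySem.Set.add_of_not_mem hm, List.map_append, PySem.Set.ofList_append]
      simp [PySem.Set.update_cons, PySem.Set.update_nil]

lemma pv_triple_inj (tag : String) (l : List (String × String × Int)) :
    ∀ a ∈ l.filter (fun e => e.1 == tag), ∀ b ∈ l.filter (fun e => e.1 == tag),
      (fun e : String × String × Int => e.2) a = (fun e : String × String × Int => e.2) b → a = b := by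
  intro a ha b hb h
  have ha1 : a.1 = tag := by simpa using (List.mem_filter.mp ha).2
  have hb1 : b.1 = tag := by simpa using (List.mem_filter.mp hb).2
  exact Prod.ext (ha1.trans hb1.symm) h

-- B's 0/1-generator sum over a set is a count of the type component
lemma pv_countP_eq_count (s : List (String × String × Int)) (tag : String) :
    s.countP (fun e => e.1 == tag) = List.count tag (s.map (fun e => e.1)) := by
  rw [List.count_eq_countP, List.countP_map]
  rfl

lemma pv_core_cnt (l : List (String × String × Int)) (tag : String) :
    List.count tag ((PySem.Set.ofList l).map (fun e => e.1))
      = (PySem.Set.ofList ((l.filter (fun e => e.1 == tag)).map (fun e => e.2))).length := by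
  rw [pv_ofList_map _ _ (pv_triple_inj tag l), List.length_map, pv_ofList_filter]
  rw [List.count_eq_countP, List.countP_map, ← List.countP_eq_length_filter]
  rfl

lemma pv_core_tp (gt pred : List (String × String × Int)) (tag : String) :
    List.count tag ((PySem.Set.inter (PySem.Set.ofList gt) (PySem.Set.ofList pred)).map (fun e => e.1))
      = (PySem.Set.inter
          (PySem.Set.ofList ((gt.filter (fun e => e.1 == tag)).map (fun e => e.2)))
          (PySem.Set.ofList ((pred.filter (fun e => e.1 == tag)).map (fun e => e.2)))).length := by
  rw [pv_ofList_map _ _ (pv_triple_inj tag gt)]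
  rw [show ∀ (s t : PySem.Set (String × Int)), PySem.Set.inter s t = s.filter (fun x => t.contains x) from fun _ _ => rfl]
  rw [List.filter_map, List.length_map]
  rw [show ∀ (s t : PySem.Set (String × String × Int)), PySem.Set.inter s t = s.filter (fun x => t.contains x) from fun _ _ => rfl]
  rw [List.count_eq_countP, List.countP_map, ← List.countP_eq_length_filter]
  rw [show (List.countP ((fun a => a == tag) ∘ (fun e : String × String × Int => e.1)))
      = (List.countP (fun e : String × String × Int => e.1 == tag)) from rfl]
  rw [List.countP_eq_length_filter, List.filter_comm, ← pv_ofList_filter,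
    List.countP_eq_length_filter]
  congr 1
  apply List.filter_congr
  intro e he
  have he' : e ∈ gt.filter (fun e => e.1 == tag) := (PySem.Set.mem_ofList _ _).mp he
  have he1 : e.1 = tag := by simpa using (List.mem_filter.mp he').2
  have hiff : e ∈ PySem.Set.ofList pred ↔
      e.2 ∈ PySem.Set.ofList ((pred.filter (fun e => e.1 == tag)).map (fun e => e.2)) := by
    rw [PySem.Set.mem_ofList, PySem.Set.mem_ofList, List.mem_map]
    constructor
    · intro h
      exact ⟨e, List.mem_filter.mpr ⟨h, by simp [he1]⟩, rfl⟩
    · rintro ⟨u, hu, h2⟩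
      obtain ⟨hu1, hu2⟩ := List.mem_filter.mp hu
      have hu1' : u.1 = tag := by simpa using hu2
      have : u = e := Prod.ext (hu1'.trans he1.symm) h2
      exact this ▸ hu1
  rw [Bool.eq_iff_iff]
  simp only [Function.comp_apply, PySem.Set.contains_iff]
  exact hiff

-- the per-sentence row list of B equals A's (tag, values) stream
lemma pv_rows_eq (gp : List (String × String × Int) × List (String × String × Int)) :
    pvSentenceRows gp
      = (PySem.List.sorted
          (PySem.Set.union (PySem.Set.ofList (pvEntityDict gp.1).keys)
                           (PySem.Set.ofList (pvEntityDict gp.2).keys))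
          (fun x => x) false).map (fun tag =>
            (tag,
             PySem.Set.len (PySem.Set.inter ((pvEntityDict gp.1).getD tag PySem.Set.empty)
                                            ((pvEntityDict gp.2).getD tag PySem.Set.empty)),
             PySem.Set.len ((pvEntityDict gp.2).getD tag PySem.Set.empty),
             PySem.Set.len ((pvEntityDict gp.1).getD tag PySem.Set.empty))) := by
  have htags : PySem.Set.ofList ((PySem.Set.ofList gp.1).map (fun e => e.1))
      = PySem.Set.ofList (pvEntityDict gp.1).keys := by
    rw [pv_entityDict_keys, PySem.Set.ofList_ofList, pv_ofList_map_ofList]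
  have htags2 : PySem.Set.ofList ((PySem.Set.ofList gp.2).map (fun e => e.1))
      = PySem.Set.ofList (pvEntityDict gp.2).keys := by
    rw [pv_entityDict_keys, PySem.Set.ofList_ofList, pv_ofList_map_ofList]
  rw [pvSentenceRows]
  simp only [htags, htags2]
  apply List.map_congr_left
  intro tag _
  have h1 : (PySem.Set.inter (PySem.Set.ofList gp.1) (PySem.Set.ofList gp.2)).countP
      (fun e => e.1 == tag)
      = (PySem.Set.inter ((pvEntityDict gp.1).getD tag PySem.Set.empty)
          ((pvEntityDict gp.2).getD tag PySem.Set.empty)).length := by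
    rw [pv_countP_eq_count, pv_core_tp, pv_entityDict_getD, pv_entityDict_getD]
  have h2 : (PySem.Set.ofList gp.2).countP (fun e => e.1 == tag)
      = ((pvEntityDict gp.2).getD tag PySem.Set.empty).length := by
    rw [pv_countP_eq_count, pv_core_cnt, pv_entityDict_getD]
  have h3 : (PySem.Set.ofList gp.1).countP (fun e => e.1 == tag)
      = ((pvEntityDict gp.1).getD tag PySem.Set.empty).length := by
    rw [pv_countP_eq_count, pv_core_cnt, pv_entityDict_getD]
  show (tag, ((_ : Nat) : Int), ((_ : Nat) : Int), ((_ : Nat) : Int)) = _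
  rw [h1, h2, h3]
  rfl

-- A's sentence step is the pvAbody' fold over B's rows for that sentence
lemma pv_stepA_rows (stats : PySem.Dict String (PySem.Dict String (List Int)))
    (gp : List (String × String × Int) × List (String × String × Int)) :
    pvStepA stats gp = (pvSentenceRows gp).foldl pvAbody' stats := by
  rw [pv_rows_eq, List.foldl_map]
  rfl

lemma pv_fold_flat (l : List (List (String × String × Int) × List (String × String × Int)))
    (stats : PySem.Dict String (PySem.Dict String (List Int))) :
    l.foldl pvStepA stats = (l.flatMap pvSentenceRows).foldl pvAbody' stats := by
  induction l generalizing stats with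
  | nil => rfl
  | cons gp rest ih =>
    rw [List.foldl_cons, List.flatMap_cons, List.foldl_append, pv_stepA_rows, ih]

-- ===== VERDICT (by name: the statement is the Claim_ definition above) =====
theorem get_ner_stats_spec : Claim_equal_get_ner_stats := by
  intro all_gt all_predictions _
  show get_ner_stats all_gt all_predictions = get_ner_stats_alt all_gt all_predictions
  simp only [get_ner_stats, get_ner_stats_alt]
  rw [PySem.List.foldl_append_eq_flatMap, List.nil_append, pv_orderLoop, pv_fold_flat,
    pv_fold_group]
  rw [pvGroup, show ∀ (l : List (String × PySem.Dict String (List Int))),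
      (PySem.Dict.mk l).items = l from fun _ => rfl, List.map_map]
  apply List.map_congr_left
  intro tag _
  rfl
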